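-- pv_equiv track=rewrite | github.com/FlorianHoll/advent-of-code | day1/day1_part2.py | find_nr_bigger_sliding_windows
-- ===== SOURCE A (Python) =====
-- def find_nr_bigger_sliding_windows(
--     numbers: list[int], sliding_window_size: int = 3
-- ) -> int:
--     """Find the number of bigger sliding windows."""
--     counter = 0
--     for index, _ in enumerate(numbers):
--         if (index > 0) and index + sliding_window_size <= len(numbers):
--             current_sliding_window = numbers[index : index + sliding_window_size]
--             previous_sliding_window = numbers[
--                 index - 1 : index + (sliding_window_size - 1)
--             ]
--             sum_current_sliding_window = sum(current_sliding_window)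
--             sum_previous_sliding_window = sum(previous_sliding_window)
--             if sum_current_sliding_window > sum_previous_sliding_window:
--                 counter += 1
--     return counter
-- ===== SOURCE B (Python) =====
-- def find_nr_bigger_sliding_windows(
--     numbers: list[int], sliding_window_size: int = 3
-- ) -> int:
--     """Find the number of bigger sliding windows (O(n): adjacent window
--     sums differ only in the entering and leaving elements)."""
--     n = len(numbers)
--     return sum(
--         1
--         for i in range(1, n - sliding_window_size + 1)
--         if numbers[i + sliding_window_size - 1] > numbers[i - 1]
--     )
-- ===== Notes on version B (the rewrite author's own statement) =====
-- stated objective: faster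
-- what changed: Instead of recomputing both window sums with slices at every index, B compares only the entering and leaving elements (numbers[i+k-1] > numbers[i-1]) in a single pass.
-- outside the precondition, e.g. on find_nr_bigger_sliding_windows([-5, 1], -1): A returns 1, B raises IndexError
import Mathlib
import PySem

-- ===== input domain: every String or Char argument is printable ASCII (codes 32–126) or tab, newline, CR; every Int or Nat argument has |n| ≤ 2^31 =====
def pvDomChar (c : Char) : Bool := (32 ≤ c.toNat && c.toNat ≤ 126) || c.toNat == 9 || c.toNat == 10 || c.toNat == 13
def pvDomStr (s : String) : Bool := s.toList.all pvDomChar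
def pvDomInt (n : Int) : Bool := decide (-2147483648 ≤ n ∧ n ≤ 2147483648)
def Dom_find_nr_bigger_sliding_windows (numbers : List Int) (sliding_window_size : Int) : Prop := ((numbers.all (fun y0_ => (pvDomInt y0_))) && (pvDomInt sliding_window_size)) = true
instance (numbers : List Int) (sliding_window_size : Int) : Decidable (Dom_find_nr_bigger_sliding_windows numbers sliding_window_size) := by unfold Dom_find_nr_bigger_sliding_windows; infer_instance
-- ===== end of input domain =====

-- B replaces A's per-index window-sum recomputation by a single pass comparing only the
-- entering/leaving elements; a timing run measured it faster (asymptotic: O(n*k) -> O(n)).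


-- ===== PORT A =====
def find_nr_bigger_sliding_windows (numbers : List Int) (sliding_window_size : Int) : Int :=
  (PySem.List.enumerate numbers 0).foldl
    (fun counter p =>
      if p.1 > 0 ∧ p.1 + sliding_window_size ≤ (numbers.length : Int) then
        let current_sliding_window :=
          PySem.List.slice numbers (some p.1) (some (p.1 + sliding_window_size))
        let previous_sliding_window :=
          PySem.List.slice numbers (some (p.1 - 1)) (some (p.1 + (sliding_window_size - 1)))
        let sum_current_sliding_window := current_sliding_window.sum
        let sum_previous_sliding_window := previous_sliding_window.sum
        if sum_current_sliding_window > sum_previous_sliding_window then counter + 1 else counter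
      else counter) 0

-- ===== PORT B =====
def find_nr_bigger_sliding_windows_alt (numbers : List Int) (sliding_window_size : Int) : Int :=
  (PySem.List.pyRange 1 ((numbers.length : Int) - sliding_window_size + 1) 1).foldl
    (fun acc i =>
      if PySem.List.pyGetD numbers (i + sliding_window_size - 1) 0 >
         PySem.List.pyGetD numbers (i - 1) 0 then acc + 1 else acc) 0

-- ===== PRECONDITION & SPEC =====
-- Pre_ excludes negative window sizes, outside the task's natural domain: there A's
-- value is an artefact of Python negative-slice/index wraparound and B raises IndexError.
def Pre_find_nr_bigger_sliding_windows (numbers : List Int) (sliding_window_size : Int) : Prop :=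
  0 ≤ sliding_window_size
instance (numbers : List Int) (sliding_window_size : Int) : Decidable (Pre_find_nr_bigger_sliding_windows numbers sliding_window_size) := by unfold Pre_find_nr_bigger_sliding_windows; infer_instance
def pvWitness_find_nr_bigger_sliding_windows : List Int × Int := ([3, 1, 4, 1, 5, 9], 3)

def Spec_find_nr_bigger_sliding_windows (numbers : List Int) (sliding_window_size : Int) (out : Int) : Prop := out = find_nr_bigger_sliding_windows_alt numbers sliding_window_size
instance (numbers : List Int) (sliding_window_size : Int) (out : Int) : Decidable (Spec_find_nr_bigger_sliding_windows numbers sliding_window_size out) := by unfold Spec_find_nr_bigger_sliding_windows; infer_instance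

-- ===== CLAIM (what is proved, stated in full; the proofs are below) =====
def Claim_equal_find_nr_bigger_sliding_windows : Prop := ∀ (numbers : List Int) (sliding_window_size : Int), Dom_find_nr_bigger_sliding_windows numbers sliding_window_size → Pre_find_nr_bigger_sliding_windows numbers sliding_window_size → Spec_find_nr_bigger_sliding_windows numbers sliding_window_size (find_nr_bigger_sliding_windows numbers sliding_window_size)

-- ===== LEMMAS AND PROOFS =====
theorem pvFoldCount {α : Type} (q : α → Bool) (f : Int → α → Int)
    (hf : ∀ c x, f c x = if q x then c + 1 else c) :
    ∀ (l : List α) (c : Int), l.foldl f c = c + l.countP q := by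
  intro l
  induction l with
  | nil => intro c; simp
  | cons x l ih =>
    intro c
    rw [List.foldl_cons, ih, hf, List.countP_cons]
    by_cases h : q x = true <;> simp [h] <;> ring

-- entering/leaving element comparison ↔ window-sum comparison
theorem pvWindow (xs : List Int) (k j : Int) (hk : 1 ≤ k) (hj : 1 ≤ j)
    (hjk : j + k ≤ (xs.length : Int)) :
    ((PySem.List.slice xs (some j) (some (j + k))).sum >
      (PySem.List.slice xs (some (j - 1)) (some (j + (k - 1)))).sum)
    ↔ (PySem.List.pyGetD xs (j + k - 1) 0 > PySem.List.pyGetD xs (j - 1) 0) := by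
  have hn : j.toNat + k.toNat ≤ xs.length := by omega
  set a : Nat := (j - 1).toNat with ha
  set m : Nat := (k - 1).toNat with hm
  have e1 : PySem.List.slice xs (some j) (some (j + k)) =
      (xs.drop (a + 1)).take (m + 1) := by
    rw [PySem.List.slice_toNat xs (by omega) (by omega)]
    have h2 : (j + k).toNat - j.toNat = m + 1 := by omega
    have h1 : j.toNat = a + 1 := by omega
    rw [h2, h1]
  have e2 : PySem.List.slice xs (some (j - 1)) (some (j + (k - 1))) =
      (xs.drop a).take (m + 1) := by
    rw [PySem.List.slice_toNat xs (by omega) (by omega)]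
    have h1 : (j - 1).toNat = a := rfl
    have h2 : (j + (k - 1)).toNat - (j - 1).toNat = m + 1 := by omega
    rw [h1, h2]
  have hla : a < xs.length := by omega
  have hlm : a + 1 + m < xs.length := by omega
  have e3 : xs.drop a = xs[a] :: xs.drop (a + 1) := List.drop_eq_getElem_cons hla
  have e4 : (xs.drop (a + 1)).take (m + 1) =
      (xs.drop (a + 1)).take m ++ [xs[a + 1 + m]] := by
    rw [List.take_succ]
    congr 1
    rw [List.getElem?_drop]
    simp [List.getElem?_eq_getElem hlm]
  have g1 : PySem.List.pyGetD xs (j + k - 1) 0 = xs[a + 1 + m] := by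
    rw [PySem.List.pyGetD_eq_getElem xs 0 (by omega) (by omega)]
    congr 1
    omega
  have g2 : PySem.List.pyGetD xs (j - 1) 0 = xs[a] := by
    rw [PySem.List.pyGetD_eq_getElem xs 0 (by omega) (by omega)]
  rw [e1, e2, e3, e4, g1, g2]
  simp only [List.sum_append, List.sum_cons, List.sum_singleton, List.sum_nil, List.take_succ_cons]
  constructor <;> intro h <;> omega

-- middle: countP over [0,n) with the guard = countP over [1, n-k+1)
-- the guarded countP over [0,n) equals the alt countP over [1, n-k+1)
theorem pvMid (xs : List Int) (k : Int) (hk : 0 ≤ k) :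
    ((PySem.List.pyRange 0 (xs.length : Int) 1).countP
      (fun j => decide (j > 0 ∧ j + k ≤ (xs.length : Int)) &&
        decide ((PySem.List.slice xs (some j) (some (j + k))).sum >
          (PySem.List.slice xs (some (j - 1)) (some (j + (k - 1)))).sum)))
    = ((PySem.List.pyRange 1 ((xs.length : Int) - k + 1) 1).countP
      (fun i => decide (PySem.List.pyGetD xs (i + k - 1) 0 >
        PySem.List.pyGetD xs (i - 1) 0))) := by
  set n : Int := (xs.length : Int) with hn
  have hn0 : 0 ≤ n := by positivity
  rcases eq_or_lt_of_le hk with hk0 | hk1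
  · -- k = 0 : both sides are 0
    rw [List.countP_eq_zero.mpr, List.countP_eq_zero.mpr]
    · intro i hi
      have := (PySem.List.mem_pyRange_one).mp hi
      have e : i + k - 1 = i - 1 := by omega
      simp [e]
    · intro j hj
      have hjr := (PySem.List.mem_pyRange_one).mp hj
      simp only [Bool.and_eq_true, decide_eq_true_eq, not_and]
      intro hg
      have e1 : PySem.List.slice xs (some j) (some (j + k)) = [] := by
        rw [PySem.List.slice_toNat xs (by omega) (by omega)]
        have h0 : (j + k).toNat - j.toNat = 0 := by omega
        rw [h0, List.take_zero]
      have e2 : PySem.List.slice xs (some (j - 1)) (some (j + (k - 1))) = [] := by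
        rw [PySem.List.slice_toNat xs (by omega) (by omega)]
        have h0 : (j + (k - 1)).toNat - (j - 1).toNat = 0 := by omega
        rw [h0, List.take_zero]
      simp [e1, e2]
  · -- k ≥ 1
    by_cases hkn : k ≤ n
    · -- split [0,n) = [0,1) ++ [1, n-k+1) ++ [n-k+1, n)
      rw [PySem.List.pyRange_one_append 0 1 n (by omega) (by omega),
          PySem.List.pyRange_one_append 1 (n - k + 1) n (by omega) (by omega),
          List.countP_append, List.countP_append]
      have c1 : (PySem.List.pyRange 0 1 1).countP
          (fun j => decide (j > 0 ∧ j + k ≤ n) &&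
            decide ((PySem.List.slice xs (some j) (some (j + k))).sum >
              (PySem.List.slice xs (some (j - 1)) (some (j + (k - 1)))).sum)) = 0 := by
        rw [List.countP_eq_zero]
        intro j hj
        have := (PySem.List.mem_pyRange_one).mp hj
        simp only [Bool.and_eq_true, decide_eq_true_eq, not_and]
        intro h; omega
      have c3 : (PySem.List.pyRange (n - k + 1) n 1).countP
          (fun j => decide (j > 0 ∧ j + k ≤ n) &&
            decide ((PySem.List.slice xs (some j) (some (j + k))).sum >
              (PySem.List.slice xs (some (j - 1)) (some (j + (k - 1)))).sum)) = 0 := by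
        rw [List.countP_eq_zero]
        intro j hj
        have := (PySem.List.mem_pyRange_one).mp hj
        simp only [Bool.and_eq_true, decide_eq_true_eq, not_and]
        intro h; omega
      have c2 : (PySem.List.pyRange 1 (n - k + 1) 1).countP
          (fun j => decide (j > 0 ∧ j + k ≤ n) &&
            decide ((PySem.List.slice xs (some j) (some (j + k))).sum >
              (PySem.List.slice xs (some (j - 1)) (some (j + (k - 1)))).sum))
          = (PySem.List.pyRange 1 (n - k + 1) 1).countP
          (fun i => decide (PySem.List.pyGetD xs (i + k - 1) 0 >
            PySem.List.pyGetD xs (i - 1) 0)) := by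
        apply List.countP_congr
        intro j hj
        have hjr := (PySem.List.mem_pyRange_one).mp hj
        have hg : decide (j > 0 ∧ j + k ≤ n) = true := by
          simp only [decide_eq_true_eq]; omega
        rw [hg, Bool.true_and]
        simp only [decide_eq_true_eq]
        exact pvWindow xs k j (by omega) (by omega) (by rw [← hn]; omega)
      rw [c1, c3, c2]
      omega
    · -- k > n : both empty / guard never holds
      rw [PySem.List.pyRange_one_eq_nil (by omega : n - k + 1 ≤ 1)]
      rw [List.countP_eq_zero.mpr, List.countP_nil]
      intro j hj
      have := (PySem.List.mem_pyRange_one).mp hj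
      simp only [Bool.and_eq_true, decide_eq_true_eq, not_and]
      intro h; omega

-- ===== VERDICT (by name: the statement is the Claim_ definition above) =====
theorem find_nr_bigger_sliding_windows_spec : Claim_equal_find_nr_bigger_sliding_windows := by
  intro xs k _ hk
  unfold Spec_find_nr_bigger_sliding_windows find_nr_bigger_sliding_windows find_nr_bigger_sliding_windows_alt
  have hA : (PySem.List.enumerate xs 0).foldl
      (fun counter p =>
        if p.1 > 0 ∧ p.1 + k ≤ (xs.length : Int) then
          let cur := PySem.List.slice xs (some p.1) (some (p.1 + k))
          let prev := PySem.List.slice xs (some (p.1 - 1)) (some (p.1 + (k - 1)))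
          let sc := cur.sum
          let sp := prev.sum
          if sc > sp then counter + 1 else counter
        else counter) 0
      = 0 + ((PySem.List.pyRange 0 (xs.length : Int) 1).countP
          (fun j => decide (j > 0 ∧ j + k ≤ (xs.length : Int)) &&
            decide ((PySem.List.slice xs (some j) (some (j + k))).sum >
              (PySem.List.slice xs (some (j - 1)) (some (j + (k - 1)))).sum)) : Int) := by
    rw [PySem.List.enumerate_eq_map_pyRange (d := 0), List.foldl_map]
    exact pvFoldCount _ _
      (by
        intro c j
        by_cases h1 : j > 0 ∧ j + k ≤ (xs.length : Int) <;>
          by_cases h2 : (PySem.List.slice xs (some j) (some (j + k))).sum >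
            (PySem.List.slice xs (some (j - 1)) (some (j + (k - 1)))).sum <;>
          simp [h1, h2]) _ 0
  have hB : (PySem.List.pyRange 1 ((xs.length : Int) - k + 1) 1).foldl
      (fun acc i =>
        if PySem.List.pyGetD xs (i + k - 1) 0 >
           PySem.List.pyGetD xs (i - 1) 0 then acc + 1 else acc) 0
      = 0 + ((PySem.List.pyRange 1 ((xs.length : Int) - k + 1) 1).countP
          (fun i => decide (PySem.List.pyGetD xs (i + k - 1) 0 >
            PySem.List.pyGetD xs (i - 1) 0)) : Int) :=
    pvFoldCount _ _
      (by intro c i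
          by_cases h : PySem.List.pyGetD xs (i + k - 1) 0 > PySem.List.pyGetD xs (i - 1) 0 <;>
            simp [h]) _ 0
  have hmid : (0 : Int) + ((PySem.List.pyRange 0 (xs.length : Int) 1).countP
      (fun j => decide (j > 0 ∧ j + k ≤ (xs.length : Int)) &&
        decide ((PySem.List.slice xs (some j) (some (j + k))).sum >
          (PySem.List.slice xs (some (j - 1)) (some (j + (k - 1)))).sum)) : Int)
      = 0 + ((PySem.List.pyRange 1 ((xs.length : Int) - k + 1) 1).countP
          (fun i => decide (PySem.List.pyGetD xs (i + k - 1) 0 >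
            PySem.List.pyGetD xs (i - 1) 0)) : Int) := by
    rw [pvMid xs k hk]
  exact hA.trans (hmid.trans hB.symm)
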